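-- pv_equiv track=rewrite | github.com/Ace1928/eidosian_forge | archive_forge/code/class_DatabaseLoader.py | _fix_name_class
-- ===== SOURCE A (Python) =====
-- def _fix_name_class(entrez_name):
--     """Map Entrez name terms to those used in taxdump (PRIVATE).
--
--     We need to make this conversion to match the taxon_name.name_class
--     values used by the BioSQL load_ncbi_taxonomy.pl script.
--
--     e.g.::
--
--         "ScientificName" -> "scientific name",
--         "EquivalentName" -> "equivalent name",
--         "Synonym" -> "synonym",
--
--     """
--
--     def add_space(letter):
--         """Add a space before a capital letter."""
--         if letter.isupper():
--             return ' ' + letter.lower()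
--         else:
--             return letter
--     answer = ''.join((add_space(letter) for letter in entrez_name)).strip()
--     if answer != answer.lower():
--         raise ValueError(f"Expected processed entrez_name, '{answer}' to only have lower case letters.")
--     return answer
-- ===== SOURCE B (Python) =====
-- def _fix_name_class(entrez_name):
--     """Map Entrez name terms to those used in taxdump (PRIVATE)."""
--     lowered = entrez_name.lower()
--     cuts = [i for i, letter in enumerate(entrez_name) if letter.isupper()]
--     pieces = [lowered[a:b] for a, b in zip([0] + cuts, cuts + [len(entrez_name)])]
--     answer = ' '.join(pieces).strip()
--     if answer != answer.lower():
--         raise ValueError(f"Expected processed entrez_name, '{answer}' to only have lower case letters.")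
--     return answer
-- ===== Notes on version B (the rewrite author's own statement) =====
-- stated objective: alternative
-- what changed: B lowercases the whole string once, collects the positions of the uppercase letters, rebuilds the answer by slicing the lowered string at those positions and joining the slices with single spaces, then strips; A instead maps every character through a generator that emits ' '+lower(ch) for capitals and joins on the empty string. The dead lowercase guard is kept verbatim.
import Mathlib
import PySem

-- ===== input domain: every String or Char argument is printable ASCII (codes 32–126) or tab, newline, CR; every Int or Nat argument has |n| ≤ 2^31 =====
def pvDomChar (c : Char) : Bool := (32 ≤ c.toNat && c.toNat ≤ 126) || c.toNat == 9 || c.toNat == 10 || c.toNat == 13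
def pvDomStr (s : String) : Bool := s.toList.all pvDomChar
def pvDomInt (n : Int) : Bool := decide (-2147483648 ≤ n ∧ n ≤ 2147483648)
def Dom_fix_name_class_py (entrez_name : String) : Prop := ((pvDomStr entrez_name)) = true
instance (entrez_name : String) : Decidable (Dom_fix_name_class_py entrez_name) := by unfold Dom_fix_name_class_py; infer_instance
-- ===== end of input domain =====

-- B lowercases the whole string once, collects the uppercase positions, and rebuilds the
-- answer by slicing the lowered string at those positions and joining the slices with single spaces;
-- A maps each character to ' '+lower(ch) / itself and joins on ''.  (alternative, same cost)
-- Python's ValueError branch (unreachable on equal answers) is represented by "" in both ports.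


-- ===== PORT A =====
-- add_space: ' ' + letter.lower() before capitals, else the letter itself
def pvAddSpace (c : Char) : List Char :=
  if PySem.Chars.isupper c then [' ', PySem.Chars.lowerChar c] else [c]

def fix_name_class_py (entrez_name : String) : String :=
  -- answer = ''.join(add_space(letter) for letter in entrez_name).strip()
  let answer : List Char :=
    PySem.Chars.strip (PySem.Chars.join [] (entrez_name.toList.map pvAddSpace))
  -- if answer != answer.lower(): raise ValueError(...)   (unreachable here; "" stands for the raise)
  if answer = PySem.Chars.lower answer then String.mk answer else ""

-- ===== PORT B =====
def fix_name_class_py_alt (entrez_name : String) : String :=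
  let cs := entrez_name.toList
  -- lowered = entrez_name.lower()
  let lowered := PySem.Chars.lower cs
  -- cuts = [i for i, letter in enumerate(entrez_name) if letter.isupper()]
  let cuts : List Int :=
    ((PySem.List.enumerate cs 0).filter (fun p => PySem.Chars.isupper p.2)).map (fun p => p.1)
  -- pieces = [lowered[a:b] for a, b in zip([0] + cuts, cuts + [len(entrez_name)])]
  let pieces := (((0 : Int) :: cuts).zip (cuts ++ [(cs.length : Int)])).map
      (fun p => PySem.List.slice lowered (some p.1) (some p.2))
  -- answer = ' '.join(pieces).strip()
  let answer := PySem.Chars.strip (PySem.Chars.join [' '] pieces)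
  -- if answer != answer.lower(): raise ValueError(...)   (unreachable here; "" stands for the raise)
  if answer = PySem.Chars.lower answer then String.mk answer else ""

-- ===== PRECONDITION & SPEC =====
def Spec_fix_name_class_py (entrez_name : String) (out : String) : Prop := out = fix_name_class_py_alt entrez_name
instance (entrez_name : String) (out : String) : Decidable (Spec_fix_name_class_py entrez_name out) := by unfold Spec_fix_name_class_py; infer_instance

-- ===== CLAIM (what is proved, stated in full; the proofs are below) =====
def Claim_equal_fix_name_class_py : Prop := ∀ (entrez_name : String), Dom_fix_name_class_py entrez_name → Spec_fix_name_class_py entrez_name (fix_name_class_py entrez_name)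

-- ===== LEMMAS AND PROOFS =====

-- positions of the uppercase letters, as a structural recursion
def pvUpIdx : List Char → List Nat
  | [] => []
  | c :: cs => (if PySem.Chars.isupper c then [0] else []) ++ (pvUpIdx cs).map (· + 1)

-- lowered[a:b] for 0 ≤ a, b (Nat form of the slice)
def pvSliceN (l : List Char) (a b : Nat) : List Char := (l.drop a).take (b - a)

def pvPiecesN (l : List Char) (ks : List Nat) (n : Nat) : List (List Char) :=
  ((0 :: ks).zip (ks ++ [n])).map (fun p => pvSliceN l p.1 p.2)

def pvConsHead (x : Char) : List (List Char) → List (List Char)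
  | [] => []
  | p :: ps => (x :: p) :: ps

theorem pv_sliceN_cons (x : Char) (l : List Char) (a b : Nat) :
    pvSliceN (x :: l) (a + 1) (b + 1) = pvSliceN l a b := by
  simp [pvSliceN]

theorem pv_enum_filter (cs : List Char) : ∀ (s : Int),
    ((PySem.List.enumerate cs s).filter (fun p => PySem.Chars.isupper p.2)).map (fun p => p.1)
      = (pvUpIdx cs).map (fun (i : Nat) => (i : Int) + s) := by
  induction cs with
  | nil => intro s; simp [PySem.List.enumerate, pvUpIdx]
  | cons c cs ih =>
    intro s
    rw [PySem.List.enumerate_cons,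
        show pvUpIdx (c :: cs)
          = (if PySem.Chars.isupper c then [0] else []) ++ (pvUpIdx cs).map (· + 1) from rfl]
    by_cases h : PySem.Chars.isupper c
    · rw [if_pos h, List.singleton_append, List.filter_cons_of_pos (by simpa using h),
          List.map_cons, List.map_cons, ih (s + 1), List.map_map]
      refine congrArg₂ List.cons (by simp) ?_
      apply List.map_congr_left; intro a _
      simp only [Function.comp_apply]; push_cast; ring
    · rw [if_neg h, List.nil_append, List.filter_cons_of_neg (by simpa using h),
          ih (s + 1), List.map_map]
      apply List.map_congr_left; intro a _
      simp only [Function.comp_apply]; push_cast; ring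

theorem pv_pieces_cons (l : List Char) (x : Char) (ks : List Nat) (n : Nat) :
    ((0 :: ks.map (· + 1)).zip ((ks ++ [n]).map (· + 1))).map
        (fun p => pvSliceN (x :: l) p.1 p.2)
      = pvConsHead x (pvPiecesN l ks n) := by
  cases ks with
  | nil => simp [pvPiecesN, pvConsHead, pvSliceN]
  | cons k kt =>
    have hz : ((k :: kt).map (· + 1)).zip (((kt ++ [n]).map (· + 1)))
        = ((k :: kt).zip (kt ++ [n])).map (Prod.map (· + 1) (· + 1)) := List.zip_map
    simp only [List.map_cons, List.cons_append, List.zip_cons_cons, List.map_cons] at hz ⊢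
    rw [hz, List.map_map]
    have hpt : ∀ p ∈ (k :: kt).zip (kt ++ [n]),
        ((fun p => pvSliceN (x :: l) p.1 p.2) ∘ Prod.map (· + 1) (· + 1)) p
          = (fun p => pvSliceN l p.1 p.2) p := by
      intro p _; simp [Function.comp, Prod.map, pv_sliceN_cons]
    rw [List.map_congr_left hpt]
    have hhead : pvSliceN (x :: l) 0 (k + 1) = x :: pvSliceN l 0 k := by simp [pvSliceN]
    simp [pvPiecesN, pvConsHead, hhead]

theorem pv_pieces_ne_nil (l : List Char) (ks : List Nat) (n : Nat) :
    pvPiecesN l ks n ≠ [] := by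
  cases ks <;> simp [pvPiecesN]

theorem pv_join_cons_head (sep : List Char) (x : Char) (p : List Char) (ps : List (List Char)) :
    PySem.Chars.join sep ((x :: p) :: ps) = x :: PySem.Chars.join sep (p :: ps) := by
  cases ps with
  | nil => simp [PySem.Chars.join_singleton]
  | cons q r => rw [PySem.Chars.join_cons_cons, PySem.Chars.join_cons_cons]; simp

theorem pv_join_consHead (x : Char) (P : List (List Char)) (h : P ≠ []) :
    PySem.Chars.join [' '] (pvConsHead x P) = x :: PySem.Chars.join [' '] P := by
  cases P with
  | nil => exact absurd rfl h
  | cons p ps => rw [pvConsHead, pv_join_cons_head]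

theorem pv_main (cs : List Char) :
    PySem.Chars.join [' '] (pvPiecesN (PySem.Chars.lower cs) (pvUpIdx cs) cs.length)
      = (cs.map pvAddSpace).flatten := by
  induction cs with
  | nil => rfl
  | cons c cs ih =>
    have hlow : PySem.Chars.lower (c :: cs) = PySem.Chars.lowerChar c :: PySem.Chars.lower cs := by
      simp [PySem.Chars.lower]
    by_cases h : PySem.Chars.isupper c
    · -- piece list becomes [] :: consHead (lowerChar c) (pieces of cs)
      have hup : pvUpIdx (c :: cs) = 0 :: (pvUpIdx cs).map (· + 1) := by
        simp [pvUpIdx, h]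
      have hsplit : pvPiecesN (PySem.Chars.lower (c :: cs)) (pvUpIdx (c :: cs)) (c :: cs).length
          = [] :: pvConsHead (PySem.Chars.lowerChar c)
              (pvPiecesN (PySem.Chars.lower cs) (pvUpIdx cs) cs.length) := by
        rw [hlow, hup]
        show (((0 : Nat) :: 0 :: (pvUpIdx cs).map (· + 1)).zip
            ((0 :: (pvUpIdx cs).map (· + 1)) ++ [cs.length + 1])).map _ = _
        have hr : ((0 : Nat) :: (pvUpIdx cs).map (· + 1)) ++ [cs.length + 1]
            = 0 :: ((pvUpIdx cs ++ [cs.length]).map (· + 1)) := by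
          simp
        rw [hr, List.zip_cons_cons, List.map_cons,
            pv_pieces_cons (PySem.Chars.lower cs) (PySem.Chars.lowerChar c) (pvUpIdx cs) cs.length]
        simp [pvSliceN]
      rw [hsplit]
      have hne : pvConsHead (PySem.Chars.lowerChar c)
          (pvPiecesN (PySem.Chars.lower cs) (pvUpIdx cs) cs.length) ≠ [] := by
        have := pv_pieces_ne_nil (PySem.Chars.lower cs) (pvUpIdx cs) cs.length
        cases hP : pvPiecesN (PySem.Chars.lower cs) (pvUpIdx cs) cs.length with
        | nil => exact absurd hP this
        | cons p ps => simp [pvConsHead]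
      cases hP : pvConsHead (PySem.Chars.lowerChar c)
          (pvPiecesN (PySem.Chars.lower cs) (pvUpIdx cs) cs.length) with
      | nil => exact absurd hP hne
      | cons q qs =>
        rw [PySem.Chars.join_cons_cons, ← hP, pv_join_consHead _ _
            (pv_pieces_ne_nil (PySem.Chars.lower cs) (pvUpIdx cs) cs.length), ih]
        simp [pvAddSpace, h]
    · have hup : pvUpIdx (c :: cs) = (pvUpIdx cs).map (· + 1) := by
        simp [pvUpIdx, h]
      have hsplit : pvPiecesN (PySem.Chars.lower (c :: cs)) (pvUpIdx (c :: cs)) (c :: cs).length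
          = pvConsHead (PySem.Chars.lowerChar c)
              (pvPiecesN (PySem.Chars.lower cs) (pvUpIdx cs) cs.length) := by
        rw [hlow, hup]
        show (((0 : Nat) :: (pvUpIdx cs).map (· + 1)).zip
            ((pvUpIdx cs).map (· + 1) ++ [cs.length + 1])).map _ = _
        have hr : (pvUpIdx cs).map (· + 1) ++ [cs.length + 1]
            = (pvUpIdx cs ++ [cs.length]).map (· + 1) := by simp
        rw [hr,
            pv_pieces_cons (PySem.Chars.lower cs) (PySem.Chars.lowerChar c) (pvUpIdx cs) cs.length]
      rw [hsplit, pv_join_consHead _ _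
          (pv_pieces_ne_nil (PySem.Chars.lower cs) (pvUpIdx cs) cs.length), ih]
      have hc : PySem.Chars.lowerChar c = c := by simp [PySem.Chars.lowerChar, h]
      simp [pvAddSpace, h, hc]

-- A's answer: ''.join over the per-character pieces is their concatenation
theorem pv_join_nil_sep (l : List (List Char)) : PySem.Chars.join [] l = l.flatten := by
  induction l with
  | nil => simp [PySem.Chars.join_nil]
  | cons a r ih =>
    cases r with
    | nil => simp [PySem.Chars.join_singleton]
    | cons b r' => rw [PySem.Chars.join_cons_cons, ih]; simp

-- B's Int-valued cuts/slices reduce to the Nat piece list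
theorem pv_alt_pieces (cs : List Char) :
    (((0 : Int) :: (((PySem.List.enumerate cs 0).filter
        (fun p => PySem.Chars.isupper p.2)).map (fun p => p.1))).zip
      ((((PySem.List.enumerate cs 0).filter
        (fun p => PySem.Chars.isupper p.2)).map (fun p => p.1)) ++ [(cs.length : Int)])).map
      (fun p => PySem.List.slice (PySem.Chars.lower cs) (some p.1) (some p.2))
      = pvPiecesN (PySem.Chars.lower cs) (pvUpIdx cs) cs.length := by
  have hc : ((PySem.List.enumerate cs 0).filter
      (fun p => PySem.Chars.isupper p.2)).map (fun p => p.1)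
      = (pvUpIdx cs).map (fun (i : Nat) => (i : Int)) := by
    rw [pv_enum_filter cs 0]
    apply List.map_congr_left; intro a _; simp only [add_zero]
  rw [hc,
      show ((0 : Int) :: (pvUpIdx cs).map (fun (i : Nat) => (i : Int)))
        = ((0 :: pvUpIdx cs).map (fun (i : Nat) => (i : Int))) from rfl,
      show ((pvUpIdx cs).map (fun (i : Nat) => (i : Int))) ++ [(cs.length : Int)]
        = ((pvUpIdx cs ++ [cs.length]).map (fun (i : Nat) => (i : Int))) from by simp,
      List.zip_map, List.map_map]
  apply List.map_congr_left
  intro p _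
  cases p with
  | mk a b => simp [Function.comp, Prod.map, PySem.List.slice_natCast, pvSliceN]

-- ===== VERDICT (by name: the statement is the Claim_ definition above) =====
theorem fix_name_class_py_spec : Claim_equal_fix_name_class_py := by
  intro s _
  unfold Spec_fix_name_class_py
  simp only [fix_name_class_py, fix_name_class_py_alt, pv_alt_pieces, pv_main, pv_join_nil_sep]
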